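-- pv_equiv track=rewrite | github.com/JolinaJ/RLE_Python | rle_program.py | string_to_data
-- ===== SOURCE A (Python) =====
-- def string_to_data(data_string):
--         data = list(data_string)
--         for i in range(0, len(data)):
--                 el = data[i].lower()
--                 if el == 'a':
--                         data[i] = 10
--                 elif el == 'b':
--                         data[i] = 11
--                 elif el == 'c':
--                         data[i] = 12
--                 elif el == 'd':
--                         data[i] = 13
--                 elif el == 'e':
--                         data[i] = 14
--                 elif el == 'f':
--                         data[i] = 15
--                 else:
--                         data[i] = int(data[i])
--         return data
-- ===== SOURCE B (Python) =====
-- def string_to_data(data_string):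
--         # branch-free: for hex digits, value = (code & 0xF) + 9*(code >> 6)
--         return [(ord(c) & 0xF) + 9 * (ord(c) >> 6) for c in data_string]
-- ===== Notes on version B (the rewrite author's own statement) =====
-- stated objective: alternative
-- what changed: Replaces the 7-way elif dispatch plus int() parse with a branch-free bit-arithmetic closed form on the character code, (ord(c) & 0xF) + 9*(ord(c) >> 6), which yields the hex value of every digit 0-9/a-f/A-F without any comparison or parsing.
import Mathlib
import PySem

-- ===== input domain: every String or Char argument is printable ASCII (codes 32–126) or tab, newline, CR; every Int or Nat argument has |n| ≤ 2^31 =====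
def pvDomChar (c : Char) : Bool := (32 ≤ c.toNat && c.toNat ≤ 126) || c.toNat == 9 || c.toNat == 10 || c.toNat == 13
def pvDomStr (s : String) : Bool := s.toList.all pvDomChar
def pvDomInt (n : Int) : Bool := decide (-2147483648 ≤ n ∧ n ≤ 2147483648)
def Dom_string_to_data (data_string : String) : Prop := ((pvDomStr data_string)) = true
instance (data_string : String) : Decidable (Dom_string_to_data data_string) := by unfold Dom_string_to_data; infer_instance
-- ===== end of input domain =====

-- B replaces A's 7-way elif dispatch plus int() parse with a branch-free
-- bit-arithmetic closed form (code & 0xF) + 9*(code >> 6) on the character code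
-- (alternative; same O(n) cost).

-- ===== PORT A =====
-- per-iteration body of A's index loop: lowercase the char, branch-chain on a..f,
-- otherwise int(data[i]) (PySem.Int.ofChars?; none = ValueError, excluded by Pre_).
def pvAStep (c : Char) : Int :=
  let el := PySem.Chars.lower [c]
  if el = ['a'] then 10
  else if el = ['b'] then 11
  else if el = ['c'] then 12
  else if el = ['d'] then 13
  else if el = ['e'] then 14
  else if el = ['f'] then 15
  else (PySem.Int.ofChars? [c]).getD 0

def string_to_data (data_string : String) : List Int :=
  data_string.toList.map pvAStep

-- ===== PORT B =====
-- (ord(c) & 0xF) + 9 * (ord(c) >> 6), per character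
def string_to_data_alt (data_string : String) : List Int :=
  data_string.toList.map (fun c => ((c.toNat % 16 : Nat) : Int) + 9 * ((c.toNat / 64 : Nat) : Int))

-- ===== PRECONDITION & SPEC =====
-- A raises ValueError on any character that is not a hexadecimal digit; Pre_ admits
-- exactly the strings of hex digits (0-9, a-f, A-F), on which A returns normally.
def Pre_string_to_data (data_string : String) : Prop :=
  data_string.toList.all
    (fun c => ('0' ≤ c && c ≤ '9') || ('a' ≤ c && c ≤ 'f') || ('A' ≤ c && c ≤ 'F')) = true
instance (data_string : String) : Decidable (Pre_string_to_data data_string) := by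
  unfold Pre_string_to_data; infer_instance

def pvWitness_string_to_data : String := "aF39"

def Spec_string_to_data (data_string : String) (out : List Int) : Prop := out = string_to_data_alt data_string
instance (data_string : String) (out : List Int) : Decidable (Spec_string_to_data data_string out) := by unfold Spec_string_to_data; infer_instance

-- ===== CLAIM (what is proved, stated in full; the proofs are below) =====
def Claim_equal_string_to_data : Prop := ∀ (data_string : String), Dom_string_to_data data_string → Pre_string_to_data data_string → Spec_string_to_data data_string (string_to_data data_string)

-- ===== LEMMAS AND PROOFS =====

-- on a hex digit, A's branch chain and B's bit-arithmetic formula agree (finite case check)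
set_option maxHeartbeats 2000000 in
theorem pvStep_eq (c : Char)
    (h : (('0' ≤ c && c ≤ '9') || ('a' ≤ c && c ≤ 'f') || ('A' ≤ c && c ≤ 'F')) = true) :
    pvAStep c = ((c.toNat % 16 : Nat) : Int) + 9 * ((c.toNat / 64 : Nat) : Int) := by
  have hc : c = Char.ofNat c.toNat := (Char.ofNat_toNat c).symm
  simp only [Bool.or_eq_true, Bool.and_eq_true, decide_eq_true_eq, Char.le_def,
    UInt32.le_iff_toNat_le] at h
  have hb : (48 ≤ c.toNat ∧ c.toNat ≤ 57) ∨ (97 ≤ c.toNat ∧ c.toNat ≤ 102) ∨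
      (65 ≤ c.toNat ∧ c.toNat ≤ 70) := by tauto
  have h48 : 48 ≤ c.toNat := by omega
  have h102 : c.toNat ≤ 102 := by omega
  interval_cases h : c.toNat <;> simp_all <;> decide

-- ===== VERDICT (by name: the statement is the Claim_ definition above) =====
theorem string_to_data_spec : Claim_equal_string_to_data := by
  intro s _ hpre
  unfold Spec_string_to_data string_to_data string_to_data_alt
  apply List.map_congr_left
  intro c hc
  exact pvStep_eq c (by
    unfold Pre_string_to_data at hpre
    simpa using List.all_eq_true.mp hpre c hc)
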